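-- pv_equiv track=rewrite | github.com/Bryand701/Digital_Portfolio | Python/Universidad 2019/examenIII_Bryand_Brenes_puntos_extra_puebas.py | verificar_matriz
-- ===== SOURCE A (Python) =====
-- def verificar_matriz(matriz,c):
--     if c == len(matriz):
--         return True
--     else:
--         if len(matriz) == len(matriz[c]):
--             return verificar_matriz(matriz,c+1)
--         else:
--             return False
-- ===== SOURCE B (Python) =====
-- def verificar_matriz(matriz, c):
--     inicio = c if c > 0 else 0
--     return all(len(matriz) == len(fila) for fila in matriz[inicio:])
-- ===== Notes on version B (the rewrite author's own statement) =====
-- stated objective: simpler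
-- what changed: Replaces A's one-row-at-a-time recursion from index c by a single slice-and-all pass starting at max(c,0) (a negative in-range c makes A wrap and eventually recheck every row, so the whole matrix is checked); Pre_ excludes only the inputs where A raises IndexError (c outside [-len, len]).
import Mathlib
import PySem

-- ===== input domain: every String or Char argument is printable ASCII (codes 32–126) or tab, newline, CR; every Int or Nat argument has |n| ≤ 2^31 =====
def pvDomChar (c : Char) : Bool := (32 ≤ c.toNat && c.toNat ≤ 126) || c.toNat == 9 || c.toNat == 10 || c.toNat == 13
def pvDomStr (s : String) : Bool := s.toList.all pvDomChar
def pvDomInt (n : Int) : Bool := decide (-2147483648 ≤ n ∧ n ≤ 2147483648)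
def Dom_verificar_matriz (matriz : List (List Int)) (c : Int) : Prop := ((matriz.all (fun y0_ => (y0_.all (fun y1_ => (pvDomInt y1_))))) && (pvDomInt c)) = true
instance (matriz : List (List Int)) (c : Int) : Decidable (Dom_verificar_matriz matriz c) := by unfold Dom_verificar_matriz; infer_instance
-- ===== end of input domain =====

-- B replaces A's index-by-index recursion by one slice-and-all pass from the clamped start; objective: simpler.

-- ===== PORT A =====
-- literal transliteration of A's recursion; pyGet? none = IndexError, excluded by Pre_
def verificar_matriz (matriz : List (List Int)) (c : Int) : Bool :=
  if c = (matriz.length : Int) then true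
  else
    match h : PySem.List.pyGet? matriz c with
    | some fila =>
        if (matriz.length : Int) = (fila.length : Int) then
          verificar_matriz matriz (c + 1)
        else false
    | none => false   -- IndexError in Python; such inputs are outside Pre_
termination_by ((matriz.length : Int) - c).toNat
decreasing_by
  have hr : PySem.Raise.InRange matriz.length c := by
    by_contra hn
    rw [(PySem.List.pyGet?_eq_none_iff matriz c).2 hn] at h
    simp at h
  unfold PySem.Raise.InRange at hr
  omega

-- ===== PORT B =====
def verificar_matriz_alt (matriz : List (List Int)) (c : Int) : Bool :=
  let inicio : Int := if c > 0 then c else 0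
  (PySem.List.slice matriz (some inicio) none).all
    (fun fila => (matriz.length : Int) == (fila.length : Int))

-- ===== PRECONDITION & SPEC =====
-- Pre_ excludes exactly the inputs where A raises IndexError: c outside [-len(matriz), len(matriz)]
def Pre_verificar_matriz (matriz : List (List Int)) (c : Int) : Prop :=
  -(matriz.length : Int) ≤ c ∧ c ≤ (matriz.length : Int)
instance (matriz : List (List Int)) (c : Int) : Decidable (Pre_verificar_matriz matriz c) := by
  unfold Pre_verificar_matriz; infer_instance

def pvWitness_verificar_matriz : List (List Int) × Int := ([[1, 2], [3, 4]], 0)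

def Spec_verificar_matriz (matriz : List (List Int)) (c : Int) (out : Bool) : Prop :=
  out = verificar_matriz_alt matriz c
instance (matriz : List (List Int)) (c : Int) (out : Bool) : Decidable (Spec_verificar_matriz matriz c out) := by
  unfold Spec_verificar_matriz; infer_instance

-- ===== CLAIM =====
def Claim_equal_verificar_matriz : Prop := ∀ (matriz : List (List Int)) (c : Int), Dom_verificar_matriz matriz c → Pre_verificar_matriz matriz c → Spec_verificar_matriz matriz c (verificar_matriz matriz c)

-- ===== LEMMAS AND PROOFS =====

-- A at a nonnegative in-range index computes "all rows from k on have length len(matriz)".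
theorem verificar_matriz_nonneg (matriz : List (List Int)) (k : Nat) (hk : k ≤ matriz.length) :
    verificar_matriz matriz (k : Int) =
      (matriz.drop k).all (fun fila => (matriz.length : Int) == (fila.length : Int)) := by
  induction hn : matriz.length - k generalizing k with
  | zero =>
      have : k = matriz.length := by omega
      subst this
      rw [verificar_matriz]
      simp
  | succ n ih =>
      have hlt : k < matriz.length := by omega
      rw [verificar_matriz]
      have hget : PySem.List.pyGet? matriz (k : Int) = some (matriz[k]) := by
        rw [PySem.List.pyGet?_natCast]
        exact List.getElem?_eq_getElem hlt
      have hdrop : matriz.drop k = matriz[k] :: matriz.drop (k + 1) :=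
        List.drop_eq_getElem_cons hlt
      rw [hget, hdrop]
      have hne : ¬ ((k : Int) = (matriz.length : Int)) := by omega
      simp only [if_neg hne, List.all_cons]
      by_cases heq : (matriz.length : Int) = (matriz[k].length : Int)
      · have : ((k : Int) + 1) = ((k + 1 : Nat) : Int) := by push_cast; ring
        rw [if_pos heq, this, ih (k + 1) (by omega) (by omega)]
        simp [heq]
      · rw [if_neg heq]
        have : ((matriz.length : Int) == (matriz[k].length : Int)) = false := by
          simp [heq]
        simp [this]

-- A at a negative in-range index checks the tail rows and then (from index 0) the whole matrix.
theorem verificar_matriz_neg (matriz : List (List Int)) (c : Int)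
    (h1 : -(matriz.length : Int) ≤ c) (h2 : c < 0) :
    verificar_matriz matriz c =
      ((matriz.drop ((matriz.length : Int) + c).toNat).all
          (fun fila => (matriz.length : Int) == (fila.length : Int))
        && verificar_matriz matriz 0) := by
  induction hn : (-c).toNat generalizing c with
  | zero => omega
  | succ n ih =>
      obtain ⟨q, rfl⟩ : ∃ q : Nat, c = -(q : Int) := ⟨(-c).toNat, by omega⟩
      have hq1 : 0 < q := by omega
      have hq2 : q ≤ matriz.length := by omega
      rw [verificar_matriz]
      have hne : ¬ (-(q : Int) = (matriz.length : Int)) := by omega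
      have hget : PySem.List.pyGet? matriz (-(q : Int))
          = some (matriz[matriz.length - q]'(by omega)) := by
        rw [PySem.List.pyGet?_neg_natCast matriz q hq1 hq2]
        exact List.getElem?_eq_getElem (by omega)
      rw [if_neg hne, hget]
      have hkeq : ((matriz.length : Int) + -(q : Int)).toNat = matriz.length - q := by omega
      have hdrop : matriz.drop (matriz.length - q)
          = (matriz[matriz.length - q]'(by omega)) :: matriz.drop (matriz.length - q + 1) :=
        List.drop_eq_getElem_cons (by omega)
      rw [hkeq, hdrop]
      simp only [List.all_cons]
      by_cases heq : (matriz.length : Int)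
          = ((matriz[matriz.length - q]'(by omega)).length : Int)
      · rw [if_pos heq]
        by_cases hc1 : -(q : Int) + 1 < 0
        · rw [ih (-(q : Int) + 1) (by omega) hc1 (by omega)]
          have h3 : ((matriz.length : Int) + (-(q : Int) + 1)).toNat
              = matriz.length - q + 1 := by omega
          rw [h3]
          simp [heq]
        · have hc0 : -(q : Int) + 1 = 0 := by omega
          have h4 : matriz.length - q + 1 = matriz.length := by omega
          rw [hc0, h4]
          simp [heq, List.drop_length]
      · rw [if_neg heq]
        have hf : ((matriz.length : Int)
            == ((matriz[matriz.length - q]'(by omega)).length : Int)) = false := by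
          simp [heq]
        simp [hf]

-- every row of a suffix satisfies the predicate if every row does
theorem all_drop_of_all {α : Type} (xs : List α) (p : α → Bool) (k : Nat)
    (h : xs.all p = true) : (xs.drop k).all p = true := by
  rw [List.all_eq_true] at h ⊢
  intro x hx
  exact h x (List.mem_of_mem_drop hx)

-- ===== VERDICT =====
theorem verificar_matriz_spec : Claim_equal_verificar_matriz := by
  intro matriz c hdom hpre
  unfold Pre_verificar_matriz at hpre
  unfold Spec_verificar_matriz verificar_matriz_alt
  by_cases hpos : c > 0
  · rw [if_pos hpos]
    show verificar_matriz matriz c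
        = (PySem.List.slice matriz (some c) none).all
            (fun fila => (matriz.length : Int) == (fila.length : Int))
    rw [PySem.List.slice_from _ (by omega : (0:Int) ≤ c)]
    have hc : c = ((c.toNat : Nat) : Int) := by omega
    rw [hc, verificar_matriz_nonneg matriz c.toNat (by omega)]
    simp
    have hmax : (max c 0).toNat = c.toNat := by omega
    rw [hmax]
  · rw [if_neg hpos]
    show verificar_matriz matriz c
        = (PySem.List.slice matriz (some 0) none).all
            (fun fila => (matriz.length : Int) == (fila.length : Int))
    rw [PySem.List.slice_from _ (by omega : (0:Int) ≤ 0)]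
    have h0 : verificar_matriz matriz 0
        = matriz.all (fun fila => (matriz.length : Int) == (fila.length : Int)) := by
      have := verificar_matriz_nonneg matriz 0 (by omega)
      simpa using this
    by_cases hc0 : c = 0
    · subst hc0
      simpa using h0
    · have hneg : c < 0 := by omega
      rw [verificar_matriz_neg matriz c (by omega) hneg, h0]
      simp only [Int.toNat_zero, List.drop_zero]
      by_cases hall : matriz.all (fun fila => (matriz.length : Int) == (fila.length : Int)) = true
      · rw [hall, all_drop_of_all _ _ _ hall]
        simp
      · simp only [Bool.not_eq_true] at hall
        rw [hall]
        simp
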